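-- pv_equiv track=rewrite | github.com/zaun/jz-hdl | examples/dvi_audio/tools/generate_melodies.py | rest_for
-- ===== SOURCE A (Python) =====
-- REST = 0
--
-- QUARTER = 24000    # ~0.50 sec
--
-- HALF    = 48000    # ~1.00 sec
--
-- WHOLE   = 96000    # ~2.00 sec
--
-- def r(dur):
--     """Rest entry."""
--     return (REST, dur, 0, 0)
--
-- def rest_for(dur_samples):
--     """Create rests totaling dur_samples. Uses whole + half + quarter rests."""
--     rests = []
--     remaining = dur_samples
--     while remaining >= WHOLE:
--         rests.append(r(WHOLE))
--         remaining -= WHOLE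
--     while remaining >= HALF:
--         rests.append(r(HALF))
--         remaining -= HALF
--     while remaining >= QUARTER:
--         rests.append(r(QUARTER))
--         remaining -= QUARTER
--     if remaining > 0:
--         rests.append(r(remaining))
--     return rests
-- ===== SOURCE B (Python) =====
-- REST = 0
-- QUARTER = 24000
-- HALF    = 48000
-- WHOLE   = 96000
--
-- def r(dur):
--     """Rest entry."""
--     return (REST, dur, 0, 0)
--
-- def rest_for(dur_samples):
--     """Create rests totaling dur_samples: closed-form counts + list replication."""
--     rests = []
--     remaining = dur_samples
--     if remaining >= WHOLE:
--         n = remaining // WHOLE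
--         rests += [r(WHOLE)] * n
--         remaining -= n * WHOLE
--     if remaining >= HALF:
--         rests.append(r(HALF))
--         remaining -= HALF
--     if remaining >= QUARTER:
--         rests.append(r(QUARTER))
--         remaining -= QUARTER
--     if remaining > 0:
--         rests.append(r(remaining))
--     return rests
-- ===== Notes on version B (the rewrite author's own statement) =====
-- stated objective: simpler
-- what changed: Replaces the three repeated-subtraction while-loops with a single floor-division for the whole-rest count plus list replication, and plain if-guards for the (at most one) half and quarter rests.
import Mathlib
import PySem

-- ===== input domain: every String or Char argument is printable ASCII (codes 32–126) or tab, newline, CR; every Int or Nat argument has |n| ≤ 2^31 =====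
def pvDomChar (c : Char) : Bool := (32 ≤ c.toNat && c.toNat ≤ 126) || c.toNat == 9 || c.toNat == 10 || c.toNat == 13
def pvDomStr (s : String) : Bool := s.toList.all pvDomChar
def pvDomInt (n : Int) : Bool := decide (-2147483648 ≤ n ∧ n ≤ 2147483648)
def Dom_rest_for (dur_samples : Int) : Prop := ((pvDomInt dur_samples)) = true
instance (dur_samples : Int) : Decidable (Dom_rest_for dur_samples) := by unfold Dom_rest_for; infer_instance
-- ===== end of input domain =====

-- B replaces A's three repeated-subtraction while-loops by a closed-form whole-rest count
-- (floor division + list replication) and single if-guards for the half/quarter tiers: simpler.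

-- ===== PORT A =====
-- r(dur) = (REST, dur, 0, 0) with REST = 0
def pvR (dur : Int) : Int × Int × Int × Int := (0, dur, 0, 0)

-- while remaining >= WHOLE: rests.append(r(WHOLE)); remaining -= WHOLE
def pvWholeLoop (rests : List (Int × Int × Int × Int)) (remaining : Int) :
    List (Int × Int × Int × Int) × Int :=
  if 96000 ≤ remaining then pvWholeLoop (rests ++ [pvR 96000]) (remaining - 96000)
  else (rests, remaining)
termination_by remaining.toNat
decreasing_by omega

-- while remaining >= HALF: rests.append(r(HALF)); remaining -= HALF
def pvHalfLoop (rests : List (Int × Int × Int × Int)) (remaining : Int) :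
    List (Int × Int × Int × Int) × Int :=
  if 48000 ≤ remaining then pvHalfLoop (rests ++ [pvR 48000]) (remaining - 48000)
  else (rests, remaining)
termination_by remaining.toNat
decreasing_by omega

-- while remaining >= QUARTER: rests.append(r(QUARTER)); remaining -= QUARTER
def pvQuarterLoop (rests : List (Int × Int × Int × Int)) (remaining : Int) :
    List (Int × Int × Int × Int) × Int :=
  if 24000 ≤ remaining then pvQuarterLoop (rests ++ [pvR 24000]) (remaining - 24000)
  else (rests, remaining)
termination_by remaining.toNat
decreasing_by omega

def rest_for (dur_samples : Int) : List (Int × Int × Int × Int) :=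
  let p1 := pvWholeLoop [] dur_samples
  let p2 := pvHalfLoop p1.1 p1.2
  let p3 := pvQuarterLoop p2.1 p2.2
  if 0 < p3.2 then p3.1 ++ [pvR p3.2] else p3.1

-- ===== PORT B =====
def rest_for_alt (dur_samples : Int) : List (Int × Int × Int × Int) :=
  let rests : List (Int × Int × Int × Int) := []
  let remaining := dur_samples
  let p1 := if 96000 ≤ remaining then
      let n := PySem.Int.floordiv remaining 96000
      (rests ++ List.replicate n.toNat (pvR 96000), remaining - n * 96000)
    else (rests, remaining)
  let p2 := if 48000 ≤ p1.2 then (p1.1 ++ [pvR 48000], p1.2 - 48000) else p1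
  let p3 := if 24000 ≤ p2.2 then (p2.1 ++ [pvR 24000], p2.2 - 24000) else p2
  if 0 < p3.2 then p3.1 ++ [pvR p3.2] else p3.1

-- ===== PRECONDITION & SPEC =====
def Spec_rest_for (dur_samples : Int) (out : List (Int × Int × Int × Int)) : Prop := out = rest_for_alt dur_samples
instance (dur_samples : Int) (out : List (Int × Int × Int × Int)) : Decidable (Spec_rest_for dur_samples out) := by unfold Spec_rest_for; infer_instance

-- ===== CLAIM (what is proved, stated in full; the proofs are below) =====
def Claim_equal_rest_for : Prop := ∀ (dur_samples : Int), Dom_rest_for dur_samples → Spec_rest_for dur_samples (rest_for dur_samples)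

-- ===== LEMMAS AND PROOFS =====
lemma pvWholeLoop_lt (acc : List (Int × Int × Int × Int)) (rem : Int) (h : rem < 96000) :
    pvWholeLoop acc rem = (acc, rem) := by
  unfold pvWholeLoop; rw [if_neg (by omega)]

lemma pvWholeLoop_eq (rem : Int) (acc : List (Int × Int × Int × Int)) (h : 96000 ≤ rem) :
    pvWholeLoop acc rem =
      (acc ++ List.replicate (rem / 96000).toNat (pvR 96000), rem % 96000) := by
  by_cases h2 : rem < 192000
  · rw [pvWholeLoop, if_pos h, pvWholeLoop_lt _ _ (by omega)]
    have hn : (rem / 96000).toNat = 1 := by omega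
    have hm : rem % 96000 = rem - 96000 := by omega
    simp [hn, hm]
  · rw [pvWholeLoop, if_pos h, pvWholeLoop_eq (rem - 96000) _ (by omega)]
    have hn : (rem / 96000).toNat = ((rem - 96000) / 96000).toNat + 1 := by omega
    have hm : rem % 96000 = (rem - 96000) % 96000 := by omega
    rw [hn, hm, List.replicate_succ]
    simp only [List.append_assoc, List.singleton_append]
termination_by rem.toNat
decreasing_by omega

lemma pvHalfLoop_lt (acc : List (Int × Int × Int × Int)) (rem : Int) (h : rem < 48000) :
    pvHalfLoop acc rem = (acc, rem) := by
  unfold pvHalfLoop; rw [if_neg (by omega)]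

lemma pvHalfLoop_once (acc : List (Int × Int × Int × Int)) (rem : Int)
    (h1 : 48000 ≤ rem) (h2 : rem < 96000) :
    pvHalfLoop acc rem = (acc ++ [pvR 48000], rem - 48000) := by
  rw [pvHalfLoop, if_pos h1, pvHalfLoop_lt _ _ (by omega)]

lemma pvQuarterLoop_lt (acc : List (Int × Int × Int × Int)) (rem : Int) (h : rem < 24000) :
    pvQuarterLoop acc rem = (acc, rem) := by
  unfold pvQuarterLoop; rw [if_neg (by omega)]

lemma pvQuarterLoop_once (acc : List (Int × Int × Int × Int)) (rem : Int)
    (h1 : 24000 ≤ rem) (h2 : rem < 48000) :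
    pvQuarterLoop acc rem = (acc ++ [pvR 24000], rem - 24000) := by
  rw [pvQuarterLoop, if_pos h1, pvQuarterLoop_lt _ _ (by omega)]

-- the two programs agree after the whole tier: generic tail lemma on a remainder < 96000
lemma pv_tail_eq (acc : List (Int × Int × Int × Int)) (rem : Int) (h : rem < 96000) :
    (let p2 := pvHalfLoop acc rem
     let p3 := pvQuarterLoop p2.1 p2.2
     if 0 < p3.2 then p3.1 ++ [pvR p3.2] else p3.1) =
    (let p2 := if 48000 ≤ rem then (acc ++ [pvR 48000], rem - 48000) else (acc, rem)
     let p3 := if 24000 ≤ p2.2 then (p2.1 ++ [pvR 24000], p2.2 - 24000) else p2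
     if 0 < p3.2 then p3.1 ++ [pvR p3.2] else p3.1) := by
  by_cases h1 : 48000 ≤ rem
  · rw [pvHalfLoop_once _ _ h1 h]
    simp only [if_pos h1]
    by_cases h2 : 24000 ≤ rem - 48000
    · rw [pvQuarterLoop_once _ _ h2 (by omega)]
      simp [h2]
    · rw [pvQuarterLoop_lt _ _ (by omega)]
      simp [h2]
  · rw [pvHalfLoop_lt _ _ (by omega)]
    simp only [if_neg h1]
    by_cases h2 : 24000 ≤ rem
    · rw [pvQuarterLoop_once _ _ h2 (by omega)]
      simp [h2]
    · rw [pvQuarterLoop_lt _ _ (by omega)]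
      simp [h2]

-- ===== VERDICT (by name: the statement is the Claim_ definition above) =====
theorem rest_for_spec : Claim_equal_rest_for := by
  intro d _
  unfold Spec_rest_for rest_for rest_for_alt
  by_cases h : 96000 ≤ d
  · have hd : PySem.Int.floordiv d 96000 = d / 96000 :=
      PySem.Int.floordiv_eq_ediv_of_pos (by omega)
    rw [pvWholeLoop_eq d [] h]
    simp only [if_pos h, hd]
    have hrem : d - d / 96000 * 96000 = d % 96000 := by omega
    rw [hrem]
    exact pv_tail_eq _ _ (by omega)
  · rw [pvWholeLoop_lt _ _ (by omega)]
    simp only [if_neg h]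
    exact pv_tail_eq _ _ (by omega)
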